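-- pv_equiv track=rewrite | github.com/kineticman/FruitDeepLinks | bin/adb_provider_mapper.py | get_logical_services_for_adb_provider
-- ===== SOURCE A (Python) =====
-- from typing import Dict, List
--
-- ADB_PROVIDER_MAP = {
--     # ESPN services -> sportscenter
--     'espn_linear': 'sportscenter',
--     'espn_plus': 'sportscenter',
--     'sportscenter': 'sportscenter',  # Keep original mapping
--     'sportsonespn': 'sportscenter',  # Legacy ESPN+ code
--
--     # Everything else maps to itself
--     # (We only need to specify exceptions to the identity mapping)
-- }
--
-- def get_logical_services_for_adb_provider(adb_provider: str) -> List[str]: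
--     """
--     Get all logical services that map to an ADB provider.
--
--     Args:
--         adb_provider: The ADB provider code (e.g., 'sportscenter')
--
--     Returns:
--         List of logical service codes that map to this provider
--     """
--     # Build reverse mapping
--     services = []
--     for logical, adb in ADB_PROVIDER_MAP.items():
--         if adb == adb_provider:
--             services.append(logical)
--
--     # Also include the provider itself if not already in the map
--     if adb_provider not in services:
--         services.append(adb_provider)
--
--     return services
-- ===== SOURCE B (Python) =====
-- from typing import Dict, List
--
-- ADB_PROVIDER_MAP = {
--     'espn_linear': 'sportscenter',
--     'espn_plus': 'sportscenter',
--     'sportscenter': 'sportscenter',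
--     'sportsonespn': 'sportscenter',
-- }
--
-- # Reverse index built once at module scope: adb provider -> logical services, in map order.
-- _REVERSE_INDEX: Dict[str, List[str]] = {}
-- for _logical, _adb in ADB_PROVIDER_MAP.items():
--     _REVERSE_INDEX.setdefault(_adb, []).append(_logical)
--
-- def get_logical_services_for_adb_provider(adb_provider: str) -> List[str]:
--     services = list(_REVERSE_INDEX.get(adb_provider, []))
--     if adb_provider not in services:
--         services.append(adb_provider)
--     return services
-- ===== Notes on version B (the rewrite author's own statement) =====
-- stated objective: idiomatic
-- what changed: B precomputes a reverse index (adb -> list of logical services) once at module scope and replaces A's per-call scan over ADB_PROVIDER_MAP with a single dict lookup plus copy.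
import Mathlib
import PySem

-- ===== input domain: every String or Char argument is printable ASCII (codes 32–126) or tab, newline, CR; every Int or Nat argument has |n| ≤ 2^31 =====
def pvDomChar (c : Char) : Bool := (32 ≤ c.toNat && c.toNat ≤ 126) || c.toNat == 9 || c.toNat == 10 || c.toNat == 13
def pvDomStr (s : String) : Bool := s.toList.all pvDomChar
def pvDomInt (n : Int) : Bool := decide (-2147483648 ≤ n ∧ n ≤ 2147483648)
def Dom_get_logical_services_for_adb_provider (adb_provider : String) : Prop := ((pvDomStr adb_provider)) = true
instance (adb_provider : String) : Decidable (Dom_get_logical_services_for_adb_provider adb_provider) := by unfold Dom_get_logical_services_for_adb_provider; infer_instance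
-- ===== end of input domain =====

-- B replaces A's per-call scan over ADB_PROVIDER_MAP with a module-level precomputed reverse index looked up per call (idiomatic; same results).


-- ===== PORT A =====
def adbProviderMap : List (String × String) :=
  [("espn_linear", "sportscenter"), ("espn_plus", "sportscenter"),
   ("sportscenter", "sportscenter"), ("sportsonespn", "sportscenter")]

def get_logical_services_for_adb_provider (adb_provider : String) : List String :=
  let services := adbProviderMap.foldl
    (fun acc kv => if kv.2 == adb_provider then acc ++ [kv.1] else acc) []
  if ¬ services.contains adb_provider then services ++ [adb_provider] else services

-- ===== PORT B =====
-- reverse index built once: fold over the map, appending each logical to its adb's bucket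
def reverseIndex : PySem.Dict String (List String) :=
  adbProviderMap.foldl (fun d kv => d.modify kv.2 [] (· ++ [kv.1])) PySem.Dict.empty

def get_logical_services_for_adb_provider_alt (adb_provider : String) : List String :=
  let services := reverseIndex.getD adb_provider []
  if ¬ services.contains adb_provider then services ++ [adb_provider] else services

-- ===== PRECONDITION & SPEC =====
def Spec_get_logical_services_for_adb_provider (adb_provider : String) (out : List String) : Prop := out = get_logical_services_for_adb_provider_alt adb_provider
instance (adb_provider : String) (out : List String) : Decidable (Spec_get_logical_services_for_adb_provider adb_provider out) := by unfold Spec_get_logical_services_for_adb_provider; infer_instance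

-- ===== CLAIM (what is proved, stated in full; the proofs are below) =====
def Claim_equal_get_logical_services_for_adb_provider : Prop := ∀ (adb_provider : String), Dom_get_logical_services_for_adb_provider adb_provider → Spec_get_logical_services_for_adb_provider adb_provider (get_logical_services_for_adb_provider adb_provider)

-- ===== LEMMAS AND PROOFS =====

-- ===== VERDICT (by name: the statement is the Claim_ definition above) =====
lemma reverseIndex_eq : reverseIndex =
    PySem.Dict.mk [("sportscenter", ["espn_linear", "espn_plus", "sportscenter", "sportsonespn"])] := by
  decide

theorem get_logical_services_for_adb_provider_spec : Claim_equal_get_logical_services_for_adb_provider := by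
  intro p _
  unfold Spec_get_logical_services_for_adb_provider
  by_cases h : p = "sportscenter"
  · subst h; decide
  · have hb : ¬ ("sportscenter" = p) := fun e => h e.symm
    simp [get_logical_services_for_adb_provider, get_logical_services_for_adb_provider_alt,
      adbProviderMap, reverseIndex_eq, PySem.Dict.getD, PySem.Dict.get?, List.foldl, hb]
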